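-- pv_equiv track=rewrite | github.com/g-simmons/289G_NLP_project_FQ2020 | py/bioinferdataset.py | invert_schema
-- ===== SOURCE A (Python) =====
-- from collections import Counter, OrderedDict
--
-- def invert_schema(schema):
--     inverted_schema = {}
--
--     for rel, argsets in schema.items():
--         for argset in argsets:
--             if argset not in inverted_schema.keys():
--                 inverted_schema[argset] = Counter()
--             inverted_schema[argset][rel] += 1
--
--     return inverted_schema
-- ===== SOURCE B (Python) =====
-- from collections import Counter
--
-- def invert_schema(schema):
--     pairs = [(argset, rel) for rel, argsets in schema.items() for argset in argsets]
--     result = {}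
--     for argset, _ in pairs:
--         if argset not in result:
--             result[argset] = Counter(r for a, r in pairs if a == argset)
--     return result
-- ===== Notes on version B (the rewrite author's own statement) =====
-- stated objective: alternative
-- what changed: B flattens the schema into a list of (argset, rel) pairs and then, for each argset at its first appearance, builds its whole Counter at once by rescanning the pair list (a group-by-rescan), instead of A's single pass that incrementally mutates per-argset Counters.
import Mathlib
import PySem

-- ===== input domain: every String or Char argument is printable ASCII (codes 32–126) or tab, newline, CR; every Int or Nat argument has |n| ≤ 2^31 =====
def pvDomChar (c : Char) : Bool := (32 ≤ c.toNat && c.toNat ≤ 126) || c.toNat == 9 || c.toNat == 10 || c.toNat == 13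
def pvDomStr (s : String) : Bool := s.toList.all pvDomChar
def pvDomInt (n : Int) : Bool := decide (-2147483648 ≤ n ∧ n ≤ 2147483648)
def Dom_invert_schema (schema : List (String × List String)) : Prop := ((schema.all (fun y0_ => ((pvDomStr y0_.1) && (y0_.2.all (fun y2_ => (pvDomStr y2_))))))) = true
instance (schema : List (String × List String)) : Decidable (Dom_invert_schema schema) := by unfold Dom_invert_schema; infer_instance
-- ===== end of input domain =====

-- B flattens the schema to (argset, rel) pairs and, at each argset's first appearance, builds its Counter at once by rescanning the pair list, instead of A's single pass mutating Counters inline (alternative algorithm, not faster).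


-- ===== PORT A =====
-- literal port of A: inline 'if argset not in keys: insert Counter()' then 'counter[rel] += 1'
def invert_schema (schema : List (String × List String)) : List (String × List (String × Int)) :=
  let inv : PySem.Dict String (PySem.Dict String Int) :=
    schema.foldl (fun inv p =>
      p.2.foldl (fun inv argset =>
        let inv' := if inv.contains argset then inv else inv.insert argset PySem.Dict.empty
        inv'.insert argset ((inv'.getD argset PySem.Dict.empty).modify p.1 0 (· + 1))) inv)
      PySem.Dict.empty
  inv.items.map (fun q => (q.1, q.2.items))

-- ===== PORT B =====
-- literal port of B: flatten to pairs, then for each first-seen argset build Counter(rels) by rescanning pairs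
def invert_schema_alt (schema : List (String × List String)) : List (String × List (String × Int)) :=
  let pairs : List (String × String) := schema.flatMap (fun p => p.2.map (fun a => (a, p.1)))
  let result : PySem.Dict String (PySem.Dict String Int) :=
    pairs.foldl (fun res q =>
      if res.contains q.1 then res
      else res.insert q.1 (PySem.Dict.counter
        (pairs.filterMap (fun r => if r.1 == q.1 then some r.2 else none))))
      PySem.Dict.empty
  result.items.map (fun q => (q.1, q.2.items))

-- ===== PRECONDITION & SPEC =====
def Spec_invert_schema (schema : List (String × List String)) (out : List (String × List (String × Int))) : Prop := out = invert_schema_alt schema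
instance (schema : List (String × List String)) (out : List (String × List (String × Int))) : Decidable (Spec_invert_schema schema out) := by unfold Spec_invert_schema; infer_instance

-- ===== CLAIM (what is proved, stated in full; the proofs are below) =====
def Claim_equal_invert_schema : Prop := ∀ (schema : List (String × List String)), Dom_invert_schema schema → Spec_invert_schema schema (invert_schema schema)

-- ===== LEMMAS AND PROOFS =====

-- the flattened (argset, rel) pair list
def pvPairs (schema : List (String × List String)) : List (String × String) :=
  schema.flatMap (fun p => p.2.map (fun a => (a, p.1)))

-- rels of one argset, in order of appearance
def pvRels (ps : List (String × String)) (a : String) : List String :=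
  ps.filterMap (fun r => if r.1 == a then some r.2 else none)

-- distinct argsets in first-appearance order
def pvFirsts (ps : List (String × String)) : List String :=
  ps.foldl (fun acc q => if q.1 ∈ acc then acc else acc ++ [q.1]) []

-- the common characterization: grouped dict keyed by first appearance
def pvTarget (ps : List (String × String)) : PySem.Dict String (List String) :=
  PySem.Dict.mk ((pvFirsts ps).map (fun a => (a, pvRels ps a)))

-- map 'counter' over the values of a grouped dict
def mapCnt (g : PySem.Dict String (List String)) : PySem.Dict String (PySem.Dict String Int) :=
  PySem.Dict.mk (g.items.map (fun p => (p.1, PySem.Dict.counter p.2)))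

theorem contains_mapCnt (g : PySem.Dict String (List String)) (a : String) :
    (mapCnt g).contains a = g.contains a := by
  simp [mapCnt, PySem.Dict.contains, List.any_map, Function.comp_def]

theorem get?_mapCnt (g : PySem.Dict String (List String)) (a : String) :
    (mapCnt g).get? a = (g.get? a).map PySem.Dict.counter := by
  simp [mapCnt, PySem.Dict.get?, List.find?_map, Function.comp_def, Option.map_map]

theorem getD_mapCnt (g : PySem.Dict String (List String)) (a : String) :
    (mapCnt g).getD a PySem.Dict.empty = PySem.Dict.counter (g.getD a []) := by
  simp only [PySem.Dict.getD, get?_mapCnt]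
  cases g.get? a <;> rfl

theorem mapCnt_insert (g : PySem.Dict String (List String)) (a : String) (v : List String) :
    mapCnt (g.insert a v) = (mapCnt g).insert a (PySem.Dict.counter v) := by
  simp only [PySem.Dict.insert, contains_mapCnt]
  by_cases h : g.contains a = true
  · simp only [h, if_true, mapCnt, List.map_map]
    congr 1
    apply List.map_congr_left
    intro p _
    by_cases hp : (p.1 == a) = true <;> simp [hp, Function.comp]
  · simp only [Bool.not_eq_true] at h
    simp [h, mapCnt]

theorem counter_snoc (l : List String) (r : String) :
    PySem.Dict.counter (l ++ [r]) = (PySem.Dict.counter l).modify r 0 (· + 1) := by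
  simp [PySem.Dict.counter, List.foldl_append]

-- one step of A equals mapCnt of one grouping step
theorem step_eq (g : PySem.Dict String (List String)) (a rel : String) :
    (let inv' := if (mapCnt g).contains a then mapCnt g else (mapCnt g).insert a PySem.Dict.empty
     inv'.insert a ((inv'.getD a PySem.Dict.empty).modify rel 0 (· + 1))) =
    mapCnt (g.modify a [] (· ++ [rel])) := by
  simp only [contains_mapCnt]
  by_cases h : g.contains a = true
  · simp only [h, if_true, getD_mapCnt]
    rw [show (PySem.Dict.counter (g.getD a [])).modify rel 0 (· + 1) =
        PySem.Dict.counter (g.getD a [] ++ [rel]) from (counter_snoc _ _).symm,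
      ← mapCnt_insert]
    rfl
  · simp only [Bool.not_eq_true] at h
    simp only [h, Bool.false_eq_true, if_false]
    rw [PySem.Dict.insert_insert_self, PySem.Dict.getD_insert_self]
    rw [show (PySem.Dict.empty : PySem.Dict String Int).modify rel 0 (· + 1) =
        PySem.Dict.counter [rel] from rfl]
    rw [show g.modify a [] (· ++ [rel]) = g.insert a [rel] from by
      rw [PySem.Dict.modify, PySem.Dict.getD_of_not_contains g (d0 := []) h]; rfl]
    rw [mapCnt_insert]

-- A's nested loop is the pair-by-pair loop over the flattened list
theorem foldA_pairs (schema : List (String × List String))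
    (inv : PySem.Dict String (PySem.Dict String Int)) :
    schema.foldl (fun inv p =>
      p.2.foldl (fun inv argset =>
        let inv' := if inv.contains argset then inv else inv.insert argset PySem.Dict.empty
        inv'.insert argset ((inv'.getD argset PySem.Dict.empty).modify p.1 0 (· + 1))) inv) inv =
    (pvPairs schema).foldl (fun inv q =>
        let inv' := if inv.contains q.1 then inv else inv.insert q.1 PySem.Dict.empty
        inv'.insert q.1 ((inv'.getD q.1 PySem.Dict.empty).modify q.2 0 (· + 1))) inv := by
  induction schema generalizing inv with
  | nil => rfl
  | cons p ps ih =>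
    rw [show pvPairs (p :: ps) = p.2.map (fun a => (a, p.1)) ++ pvPairs ps from rfl,
      List.foldl_cons, List.foldl_append, List.foldl_map, ih]

-- the pair loop of A computes mapCnt of the grouping loop
theorem foldA_eq_mapCnt (ps : List (String × String)) (g : PySem.Dict String (List String)) :
    ps.foldl (fun inv q =>
        let inv' := if inv.contains q.1 then inv else inv.insert q.1 PySem.Dict.empty
        inv'.insert q.1 ((inv'.getD q.1 PySem.Dict.empty).modify q.2 0 (· + 1))) (mapCnt g) =
    mapCnt (ps.foldl (fun g q => g.modify q.1 [] (· ++ [q.2])) g) := by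
  induction ps generalizing g with
  | nil => rfl
  | cons q qs ih => simp only [List.foldl_cons, step_eq, ih]

theorem mem_firsts_aux (ps : List (String × String)) (acc : List String) (x : String) :
    x ∈ ps.foldl (fun acc q => if q.1 ∈ acc then acc else acc ++ [q.1]) acc ↔
      x ∈ acc ∨ x ∈ ps.map Prod.fst := by
  induction ps generalizing acc with
  | nil => simp
  | cons q qs ih =>
    simp only [List.foldl_cons, List.map_cons, List.mem_cons, ih]
    by_cases h : q.1 ∈ acc
    · rw [if_pos h]
      constructor
      · rintro (hx | hx)
        · exact Or.inl hx
        · exact Or.inr (Or.inr hx)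
      · rintro (hx | hx | hx)
        · exact Or.inl hx
        · exact Or.inl (hx ▸ h)
        · exact Or.inr hx
    · rw [if_neg h]
      simp only [List.mem_append, List.mem_singleton]
      tauto

theorem mem_pvFirsts (ps : List (String × String)) (x : String) :
    x ∈ pvFirsts ps ↔ x ∈ ps.map Prod.fst := by
  simpa using mem_firsts_aux ps [] x

theorem nodup_firsts_aux (ps : List (String × String)) (acc : List String) (h : acc.Nodup) :
    (ps.foldl (fun acc q => if q.1 ∈ acc then acc else acc ++ [q.1]) acc).Nodup := by
  induction ps generalizing acc with
  | nil => exact h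
  | cons q qs ih =>
    simp only [List.foldl_cons]
    by_cases hm : q.1 ∈ acc
    · simpa [hm] using ih acc h
    · simp only [hm, if_false]
      refine ih _ ?_
      rw [List.nodup_append]
      refine ⟨h, List.nodup_singleton _, ?_⟩
      intro a ha b hb e
      rw [List.mem_singleton] at hb
      exact hm ((e.trans hb) ▸ ha)

theorem nodup_pvFirsts (ps : List (String × String)) : (pvFirsts ps).Nodup :=
  nodup_firsts_aux ps [] List.nodup_nil

theorem pvFirsts_append (ps : List (String × String)) (q : String × String) :
    pvFirsts (ps ++ [q]) =
      if q.1 ∈ pvFirsts ps then pvFirsts ps else pvFirsts ps ++ [q.1] := by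
  simp [pvFirsts, List.foldl_append]

theorem pvRels_append (ps : List (String × String)) (q : String × String) (a : String) :
    pvRels (ps ++ [q]) a = pvRels ps a ++ (if q.1 == a then [q.2] else []) := by
  simp only [pvRels, List.filterMap_append, List.filterMap_cons, List.filterMap_nil]
  by_cases h : (q.1 == a) = true <;> simp [h]

theorem pvRels_nil_of_not_mem (ps : List (String × String)) (a : String)
    (h : a ∉ ps.map Prod.fst) : pvRels ps a = [] := by
  induction ps with
  | nil => rfl
  | cons q qs ih =>
    simp only [List.map_cons, List.mem_cons, not_or] at h
    simp only [pvRels, List.filterMap_cons]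
    have : (q.1 == a) = false := by simpa [beq_iff_eq] using fun e => h.1 e.symm
    simpa [this, pvRels] using ih h.2

theorem pvItems_mk {κ ν : Type} [BEq κ] (l : List (κ × ν)) : (PySem.Dict.mk l).items = l := rfl

theorem keys_pvTarget (ps : List (String × String)) :
    (pvTarget ps).keys = pvFirsts ps := by
  simp [pvTarget, PySem.Dict.keys, pvItems_mk, List.map_map, Function.comp_def]

theorem contains_pvTarget (ps : List (String × String)) (a : String) :
    (pvTarget ps).contains a = decide (a ∈ pvFirsts ps) := by
  rw [PySem.Dict.contains_eq_decide_mem_keys, keys_pvTarget]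

theorem getD_pvTarget (ps : List (String × String)) (a : String) (h : a ∈ pvFirsts ps) :
    (pvTarget ps).getD a [] = pvRels ps a := by
  apply PySem.Dict.getD_of_mem_items
  · simp only [pvTarget, pvItems_mk]
    exact List.mem_map.mpr ⟨a, h, rfl⟩
  · rw [keys_pvTarget]; exact nodup_pvFirsts ps

-- one grouping step advances pvTarget by one pair
theorem pvTarget_snoc (ps : List (String × String)) (q : String × String) :
    pvTarget (ps ++ [q]) = (pvTarget ps).modify q.1 [] (· ++ [q.2]) := by
  rw [PySem.Dict.modify]
  by_cases h : q.1 ∈ pvFirsts ps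
  · rw [getD_pvTarget ps q.1 h]
    apply PySem.Dict.ext
    rw [PySem.Dict.items_insert_of_contains _ _ (by simp [contains_pvTarget, h])]
    simp only [pvTarget, pvItems_mk, pvFirsts_append, h, if_true, List.map_map]
    apply List.map_congr_left
    intro a _
    by_cases ha : a = q.1
    · subst ha; simp [pvRels_append]
    · have hne : (a == q.1) = false := by simpa [beq_iff_eq] using ha
      have hne2 : (q.1 == a) = false := by
        simp only [beq_eq_false_iff_ne, ne_eq]
        exact fun e => ha e.symm
      simp [Function.comp, hne, hne2, pvRels_append]
  · have hc : (pvTarget ps).contains q.1 = false := by simp [contains_pvTarget, h]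
    rw [PySem.Dict.getD_of_not_contains _ _ hc]
    apply PySem.Dict.ext
    rw [PySem.Dict.items_insert_of_not_contains _ _ hc]
    simp only [pvTarget, pvItems_mk, pvFirsts_append, h, if_false, List.map_append,
      List.map_cons, List.map_nil]
    have h1 : List.map (fun a => (a, pvRels (ps ++ [q]) a)) (pvFirsts ps) =
        List.map (fun a => (a, pvRels ps a)) (pvFirsts ps) := by
      apply List.map_congr_left
      intro a ha
      have hne : (q.1 == a) = false := by
        simp only [beq_eq_false_iff_ne, ne_eq]
        exact fun e => h (e ▸ ha)
      simp [pvRels_append, hne]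
    have h0 : pvRels ps q.1 = [] :=
      pvRels_nil_of_not_mem ps q.1 (fun hm => h ((mem_pvFirsts ps q.1).mpr hm))
    have h2 : pvRels (ps ++ [q]) q.1 = [] ++ [q.2] := by
      simp [pvRels_append, h0]
    rw [h1, h2]

theorem grouping_eq_pvTarget (ps : List (String × String)) :
    ps.foldl (fun g q => g.modify q.1 [] (· ++ [q.2])) PySem.Dict.empty = pvTarget ps := by
  induction ps using List.reverseRecOn with
  | nil => rfl
  | append_singleton qs q ih => rw [List.foldl_append, List.foldl_cons, List.foldl_nil, ih,
      pvTarget_snoc]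

-- B's fold: state after a prefix is mapCnt of pvTarget restricted to that prefix's firsts
def pvTgt (ps pre : List (String × String)) : PySem.Dict String (PySem.Dict String Int) :=
  PySem.Dict.mk ((pvFirsts pre).map (fun a => (a, PySem.Dict.counter (pvRels ps a))))

theorem contains_pvTgt (ps pre : List (String × String)) (a : String) :
    (pvTgt ps pre).contains a = decide (a ∈ pvFirsts pre) := by
  rw [PySem.Dict.contains_eq_decide_mem_keys]
  simp [pvTgt, PySem.Dict.keys]

theorem foldB_eq (ps : List (String × String)) (suf pre : List (String × String)) :
    suf.foldl (fun res q =>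
      if res.contains q.1 then res
      else res.insert q.1 (PySem.Dict.counter (pvRels ps q.1))) (pvTgt ps pre) =
    pvTgt ps (pre ++ suf) := by
  induction suf generalizing pre with
  | nil => simp
  | cons q suf' ih =>
    simp only [List.foldl_cons, contains_pvTgt]
    by_cases h : q.1 ∈ pvFirsts pre
    · have e1 : pvTgt ps (pre ++ [q]) = pvTgt ps pre := by
        simp [pvTgt, pvFirsts_append, h]
      simp only [h, decide_true, if_true]
      rw [show pre ++ q :: suf' = (pre ++ [q]) ++ suf' by simp, ← ih (pre ++ [q]), e1]
    · have hc : (pvTgt ps pre).contains q.1 = false := by simp [contains_pvTgt, h]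
      have e2 : (pvTgt ps pre).insert q.1 (PySem.Dict.counter (pvRels ps q.1)) =
          pvTgt ps (pre ++ [q]) := by
        apply PySem.Dict.ext
        rw [PySem.Dict.items_insert_of_not_contains _ _ hc]
        simp [pvTgt, pvFirsts_append, h]
      simp only [h, decide_false, Bool.false_eq_true, if_false]
      rw [e2, show pre ++ q :: suf' = (pre ++ [q]) ++ suf' by simp, ← ih (pre ++ [q])]

theorem pvTgt_full (ps : List (String × String)) :
    pvTgt ps ps = mapCnt (pvTarget ps) := by
  apply PySem.Dict.ext
  simp [pvTgt, mapCnt, pvTarget, List.map_map, Function.comp]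

-- ===== VERDICT (by name: the statement is the Claim_ definition above) =====
theorem invert_schema_spec : Claim_equal_invert_schema := by
  intro schema _
  unfold Spec_invert_schema
  have hA : schema.foldl (fun inv p =>
      p.2.foldl (fun inv argset =>
        let inv' := if inv.contains argset then inv else inv.insert argset PySem.Dict.empty
        inv'.insert argset ((inv'.getD argset PySem.Dict.empty).modify p.1 0 (· + 1))) inv)
      PySem.Dict.empty = pvTgt (pvPairs schema) (pvPairs schema) := by
    rw [foldA_pairs,
      show (PySem.Dict.empty : PySem.Dict String (PySem.Dict String Int)) =
        mapCnt PySem.Dict.empty from rfl,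
      foldA_eq_mapCnt, grouping_eq_pvTarget, ← pvTgt_full]
  have hB : (pvPairs schema).foldl (fun res q =>
      if res.contains q.1 then res
      else res.insert q.1 (PySem.Dict.counter (pvRels (pvPairs schema) q.1)))
      PySem.Dict.empty = pvTgt (pvPairs schema) (pvPairs schema) := by
    simpa using foldB_eq (pvPairs schema) (pvPairs schema) []
  show (schema.foldl (fun inv p =>
      p.2.foldl (fun inv argset =>
        let inv' := if inv.contains argset then inv else inv.insert argset PySem.Dict.empty
        inv'.insert argset ((inv'.getD argset PySem.Dict.empty).modify p.1 0 (· + 1))) inv)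
      PySem.Dict.empty).items.map (fun q => (q.1, q.2.items)) =
    ((pvPairs schema).foldl (fun res q =>
      if res.contains q.1 then res
      else res.insert q.1 (PySem.Dict.counter (pvRels (pvPairs schema) q.1)))
      PySem.Dict.empty).items.map (fun q => (q.1, q.2.items))
  rw [hA, hB]
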